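-- pv_equiv track=rewrite | github.com/davdleet/algorithms-practice | BOJ/contest/777/10/grader/grader.py | calc
-- ===== SOURCE A (Python) =====
-- def calc(v, N):
--     ans = [0 for i in range(N)]
--     ans[0] = 1
--
--     for x in range(1, N):
--         for y in range(0, x):
--             m = 1000000000000000000  # (1e18)
--             for z in range(y, x+1):
--                 m = min(m, v[z])
--
--             ans[x] = ans[x] + ans[y] * m
--             ans[x] = ans[x] % 1000000007  # (1e9 + 7)
--     return ans
-- ===== SOURCE B (Python) =====
-- def calc(v, N):
--     MOD = 1000000007
--     ans = [0] * N
--     ans[0] = 1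
--     for x in range(1, N):
--         m = v[x]
--         total = 0
--         for y in range(x - 1, -1, -1):
--             m = min(m, v[y])
--             total = total + ans[y] * m
--         ans[x] = total % MOD
--     return ans
-- ===== Notes on version B (the rewrite author's own statement) =====
-- stated objective: faster
-- what changed: B replaces A's innermost z-scan by a running minimum maintained while y scans downward and takes one modulo per row instead of per term, dropping O(N^3) to O(N^2).
import Mathlib
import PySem

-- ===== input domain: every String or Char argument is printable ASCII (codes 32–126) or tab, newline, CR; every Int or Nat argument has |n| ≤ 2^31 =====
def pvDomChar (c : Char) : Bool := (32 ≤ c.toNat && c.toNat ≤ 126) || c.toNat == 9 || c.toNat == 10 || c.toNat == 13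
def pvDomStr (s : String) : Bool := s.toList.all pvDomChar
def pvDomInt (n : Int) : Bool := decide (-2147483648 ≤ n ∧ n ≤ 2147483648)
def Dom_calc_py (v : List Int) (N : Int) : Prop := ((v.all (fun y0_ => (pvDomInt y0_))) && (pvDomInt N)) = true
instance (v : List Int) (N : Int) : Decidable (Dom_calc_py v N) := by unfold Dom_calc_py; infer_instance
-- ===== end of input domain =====

-- B replaces A's innermost z-scan by a running minimum maintained while y scans downward (O(N^3) -> O(N^2)); equivalence of return values proved on Pre_.

-- ===== PORT A =====
-- m = 1e18; for z in range(y, x+1): m = min(m, v[z])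
def innerZ (v : List Int) (y x : Int) : Int :=
  (PySem.List.pyRange y (x + 1) 1).foldl
    (fun m z => min m (PySem.List.pyGetD v z 0)) 1000000000000000000

-- body of 'for y in range(0, x)': ans[x] = (ans[x] + ans[y] * m) % (1e9+7)
def stepY (v : List Int) (x : Int) (ans : List Int) (y : Int) : List Int :=
  let m := innerZ v y x
  let t := PySem.List.pyGetD ans x 0 + PySem.List.pyGetD ans y 0 * m
  ans.set x.toNat (PySem.Int.mod t 1000000007)   -- ans[x] = t % MOD (x in range under Pre_)

-- body of 'for x in range(1, N)'
def stepX (v : List Int) (ans : List Int) (x : Int) : List Int :=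
  (PySem.List.pyRange 0 x 1).foldl (stepY v x) ans

def calc_py (v : List Int) (N : Int) : List Int :=
  -- ans = [0 for i in range(N)]; ans[0] = 1 (raises for N < 1: excluded by Pre_); then the x-loop
  (PySem.List.pyRange 1 N 1).foldl (stepX v) ((List.replicate N.toNat 0).set 0 1)

-- ===== PORT B =====
-- body of 'for y in range(x-1, -1, -1)': m = min(m, v[y]); total = total + ans[y] * m
def stepYB (v L : List Int) (p : Int × Int) (y : Int) : Int × Int :=
  let m := min p.1 (PySem.List.pyGetD v y 0)
  (m, p.2 + PySem.List.pyGetD L y 0 * m)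

-- body of 'for x in range(1, N)': m = v[x]; total = 0; countdown y-loop; ans[x] = total % MOD
def stepXB (v : List Int) (ans : List Int) (x : Int) : List Int :=
  ans.set x.toNat (PySem.Int.mod
    ((PySem.List.pyRange (x - 1) (-1) (-1)).foldl (stepYB v ans)
      (PySem.List.pyGetD v x 0, 0)).2 1000000007)

def calc_py_alt (v : List Int) (N : Int) : List Int :=
  -- ans = [0] * N; ans[0] = 1 (raises for N < 1: excluded by Pre_); then the x-loop
  (PySem.List.pyRange 1 N 1).foldl (stepXB v) ((List.replicate N.toNat 0).set 0 1)

-- ===== PRECONDITION & SPEC =====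
-- Pre_ excludes exactly the inputs where Python A raises IndexError: N < 1 (ans[0] on an
-- empty list), and N ≥ 2 with N > len(v) (v[z] out of range). Nothing else is excluded.
def Pre_calc_py (v : List Int) (N : Int) : Prop := 1 ≤ N ∧ (1 < N → N ≤ (v.length : Int))
instance (v : List Int) (N : Int) : Decidable (Pre_calc_py v N) := by unfold Pre_calc_py; infer_instance
def pvWitness_calc_py : List Int × Int := ([3, 1, 2], 3)
def Spec_calc_py (v : List Int) (N : Int) (out : List Int) : Prop := out = calc_py_alt v N
instance (v : List Int) (N : Int) (out : List Int) : Decidable (Spec_calc_py v N out) := by unfold Spec_calc_py; infer_instance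

-- ===== CLAIM (what is proved, stated in full; the proofs are below) =====
def Claim_equal_calc_py : Prop := ∀ (v : List Int) (N : Int), Dom_calc_py v N → Pre_calc_py v N → Spec_calc_py v N (calc_py v N)

-- ===== LEMMAS AND PROOFS =====

-- canonical minimum: fold of min over v[a..b-1] with initial value i
def fmin (v : List Int) (a b i : Int) : Int :=
  ((PySem.List.pyRange a b 1).map (fun z => PySem.List.pyGetD v z 0)).foldl min i

lemma innerZ_eq_fmin (v : List Int) (y x : Int) :
    innerZ v y x = fmin v y (x + 1) 1000000000000000000 := by
  unfold innerZ fmin; rw [List.foldl_map]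

lemma foldl_min_comm (l : List Int) (a : Int) :
    ∀ b : Int, l.foldl min (min a b) = min a (l.foldl min b) := by
  induction l with
  | nil => intro b; rfl
  | cons c l ih => intro b; simp only [List.foldl_cons, min_assoc]; exact ih (min b c)

lemma foldl_min_init_le (l : List Int) {a C : Int} (h : a ≤ C) :
    l.foldl min a = min a (l.foldl min C) := by
  induction l with
  | nil => simp [min_eq_left h]
  | cons c l ih =>
    simp only [List.foldl_cons]
    rw [min_comm a c, foldl_min_comm, ih, min_comm C c, foldl_min_comm, min_left_comm]

lemma fmin_append (v : List Int) {a b : Int} (i : Int) (hab : a ≤ b) :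
    fmin v a (b + 1) i = min (fmin v a b i) (PySem.List.pyGetD v b 0) := by
  unfold fmin
  rw [PySem.List.pyRange_one_succ_right hab]
  simp [List.foldl_append]

lemma fmin_init_merge (v : List Int) (a b i e : Int) :
    fmin v a b (min i e) = min (fmin v a b i) e := by
  unfold fmin
  rw [min_comm i e, foldl_min_comm, min_comm]

lemma fmin_sentinel (v : List Int) {a b : Int} (hab : a ≤ b)
    (hb : PySem.List.pyGetD v b 0 ≤ 1000000000000000000) :
    fmin v a (b + 1) 1000000000000000000 = fmin v a b (PySem.List.pyGetD v b 0) := by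
  rw [fmin_append _ _ hab]
  unfold fmin
  rw [foldl_min_init_le _ hb, min_comm]

lemma mod_fold (t : Int → Int) (l : List Int) :
    ∀ d : Int, l.foldl (fun a y => PySem.Int.mod (a + t y) 1000000007) (PySem.Int.mod d 1000000007)
      = PySem.Int.mod (d + (l.map t).sum) 1000000007 := by
  induction l with
  | nil => intro d; simp
  | cons y l ih =>
    intro d
    simp only [List.foldl_cons, List.map_cons, List.sum_cons]
    have h1 : PySem.Int.mod (PySem.Int.mod d 1000000007 + t y) 1000000007
        = PySem.Int.mod (d + t y) 1000000007 := by
      rw [PySem.Int.mod_eq_emod_of_pos (by norm_num), PySem.Int.mod_eq_emod_of_pos (by norm_num),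
        PySem.Int.mod_eq_emod_of_pos (by norm_num), Int.emod_add_emod]
    rw [h1, ih (d + t y), ← add_assoc]

lemma mod_fold0 (t : Int → Int) (l : List Int) :
    l.foldl (fun a y => PySem.Int.mod (a + t y) 1000000007) 0
      = PySem.Int.mod ((l.map t).sum) 1000000007 := by
  have h0 : PySem.Int.mod 0 1000000007 = (0 : Int) := by
    rw [PySem.Int.mod_eq_emod_of_pos (by norm_num)]; simp
  have h := mod_fold t l 0
  rw [h0, zero_add] at h
  exact h

lemma pyGetD_append_left (L r : List Int) (y : Int) (hy0 : 0 ≤ y) (hyL : y < (L.length : Int)) :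
    PySem.List.pyGetD (L ++ r) y 0 = PySem.List.pyGetD L y 0 := by
  have h1 : y.toNat < L.length := by omega
  rw [PySem.List.pyGetD_eq_getElem _ _ hy0 (by simp; omega),
    PySem.List.pyGetD_eq_getElem _ _ hy0 (by exact_mod_cast hyL)]
  exact List.getElem_append_left h1

-- A's inner y-loop: only index x = len L is written; reads at y < len L see L
lemma innerA_eq (v L r : List Int) :
    ∀ (ys : List Int), (∀ y ∈ ys, 0 ≤ y ∧ y < (L.length : Int)) → ∀ c : Int,
      ys.foldl (stepY v (L.length : Int)) (L ++ c :: r)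
        = L ++ (ys.foldl
            (fun a y => PySem.Int.mod (a + PySem.List.pyGetD L y 0 * innerZ v y (L.length : Int)) 1000000007) c) :: r := by
  intro ys
  induction ys with
  | nil => intro _ c; rfl
  | cons y ys ih =>
    intro hmem c
    have hy0 := (hmem y List.mem_cons_self).1
    have hyL := (hmem y List.mem_cons_self).2
    have hrest : ∀ z ∈ ys, 0 ≤ z ∧ z < (L.length : Int) := fun z hz => hmem z (List.mem_cons_of_mem _ hz)
    simp only [List.foldl_cons]
    have hx : PySem.List.pyGetD (L ++ c :: r) (L.length : Int) 0 = c := by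
      rw [PySem.List.pyGetD_natCast]
      simp [List.getD]
    have hy : PySem.List.pyGetD (L ++ c :: r) y 0 = PySem.List.pyGetD L y 0 :=
      pyGetD_append_left L (c :: r) y hy0 hyL
    have hset : ∀ w : Int, (L ++ c :: r).set ((L.length : Int)).toNat w = L ++ w :: r := by
      intro w; simp
    rw [show stepY v (L.length : Int) (L ++ c :: r) y
        = L ++ (PySem.Int.mod (c + PySem.List.pyGetD L y 0 * innerZ v y (L.length : Int)) 1000000007) :: r by
      unfold stepY; rw [hx, hy, hset]]
    exact ih hrest _

-- B's inner countdown loop: second component is the sum of ans[y] * (running min of v[y..n-1] from m0)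
lemma innerB_eq (v L : List Int) :
    ∀ (n : Nat) (m0 t0 : Int),
      ((PySem.List.pyRange ((n : Int) - 1) (-1) (-1)).foldl (stepYB v L) (m0, t0)).2
        = t0 + ((PySem.List.pyRange 0 (n : Int) 1).map
            (fun y => PySem.List.pyGetD L y 0 * fmin v y (n : Int) m0)).sum := by
  intro n
  induction n with
  | zero =>
    intro m0 t0
    simp only [Nat.cast_zero]
    rw [show (0 : Int) - 1 = -1 by norm_num,
      PySem.List.pyRange_neg_one_eq_nil (le_refl _),
      PySem.List.pyRange_one_eq_nil (le_refl _)]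
    simp
  | succ n ih =>
    intro m0 t0
    have hcast : ((n + 1 : Nat) : Int) - 1 = (n : Int) := by push_cast; ring
    rw [hcast, PySem.List.pyRange_neg_one_cons (by omega : (-1 : Int) < (n : Int)), List.foldl_cons]
    have hstep : stepYB v L (m0, t0) (n : Int)
        = (min m0 (PySem.List.pyGetD v (n : Int) 0),
           t0 + PySem.List.pyGetD L (n : Int) 0 * min m0 (PySem.List.pyGetD v (n : Int) 0)) := rfl
    rw [hstep, ih]
    rw [show ((n + 1 : Nat) : Int) = (n : Int) + 1 by push_cast; ring,
      PySem.List.pyRange_one_succ_right (by omega : (0 : Int) ≤ (n : Int))]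
    rw [List.map_append, List.sum_append]
    have hlast : fmin v (n : Int) ((n : Int) + 1) m0 = min m0 (PySem.List.pyGetD v (n : Int) 0) := by
      rw [fmin_append _ _ (le_refl _)]
      unfold fmin
      rw [PySem.List.pyRange_one_eq_nil (le_refl _)]
      rfl
    have hterms : (PySem.List.pyRange 0 (n : Int) 1).map
          (fun y => PySem.List.pyGetD L y 0 * fmin v y (n : Int) (min m0 (PySem.List.pyGetD v (n : Int) 0)))
        = (PySem.List.pyRange 0 (n : Int) 1).map
          (fun y => PySem.List.pyGetD L y 0 * fmin v y ((n : Int) + 1) m0) := by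
      refine List.map_congr_left (fun y hy => ?_)
      have hy' := (PySem.List.mem_pyRange_one).1 hy
      rw [fmin_init_merge, fmin_append _ _ (by omega : y ≤ (n : Int))]
    rw [hterms]
    simp [hlast]
    ring

-- the common value of the new row entry
def newval (v L : List Int) : Int :=
  PySem.Int.mod (((PySem.List.pyRange 0 (L.length : Int) 1).map
    (fun y => PySem.List.pyGetD L y 0 * innerZ v y (L.length : Int))).sum) 1000000007

lemma stepA_eq (v L r : List Int) :
    stepX v (L ++ 0 :: r) (L.length : Int) = L ++ newval v L :: r := by
  unfold stepX
  rw [innerA_eq v L r _ (fun y hy => by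
    have h := (PySem.List.mem_pyRange_one).1 hy; exact ⟨h.1, h.2⟩)]
  rw [mod_fold0]
  rfl

lemma stepB_eq (v L : List Int) (hv : ∀ e ∈ v, e ≤ 1000000000000000000)
    (hlen : L.length < v.length) (r : List Int) :
    stepXB v (L ++ 0 :: r) (L.length : Int) = L ++ newval v L :: r := by
  unfold stepXB
  rw [innerB_eq v (L ++ 0 :: r) L.length (PySem.List.pyGetD v (L.length : Int) 0) 0, zero_add]
  have hx : PySem.List.pyGetD v (L.length : Int) 0 ≤ 1000000000000000000 := by
    refine hv _ ?_
    apply PySem.List.pyGetD_mem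
    unfold PySem.Raise.InRange
    constructor <;> [omega; exact_mod_cast Int.ofNat_lt.2 hlen]
  have hterms : (PySem.List.pyRange 0 (L.length : Int) 1).map
        (fun y => PySem.List.pyGetD (L ++ 0 :: r) y 0 * fmin v y (L.length : Int) (PySem.List.pyGetD v (L.length : Int) 0))
      = (PySem.List.pyRange 0 (L.length : Int) 1).map
        (fun y => PySem.List.pyGetD L y 0 * innerZ v y (L.length : Int)) := by
    refine List.map_congr_left (fun y hy => ?_)
    have h := (PySem.List.mem_pyRange_one).1 hy
    rw [pyGetD_append_left L (0 :: r) y h.1 h.2,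
      innerZ_eq_fmin, fmin_sentinel v (by omega : y ≤ (L.length : Int)) hx]
  rw [hterms]
  have hset : ∀ w : Int, (L ++ 0 :: r).set ((L.length : Int)).toNat w = L ++ w :: r := by
    intro w; simp
  rw [hset]
  rfl

lemma outer_eq (v : List Int) (hv : ∀ e ∈ v, e ≤ 1000000000000000000) (N : Int)
    (hNv : N ≤ (v.length : Int)) :
    ∀ (p : Nat) (L : List Int), 1 ≤ L.length → (L.length : Int) + (p : Int) = N →
      (PySem.List.pyRange (L.length : Int) N 1).foldl (stepX v) (L ++ List.replicate p 0)
        = (PySem.List.pyRange (L.length : Int) N 1).foldl (stepXB v) (L ++ List.replicate p 0) := by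
  intro p
  induction p with
  | zero =>
    intro L hL h2
    push_cast at h2
    rw [PySem.List.pyRange_one_eq_nil (by omega)]
    rfl
  | succ p ih =>
    intro L hL h2
    have hlt : (L.length : Int) < N := by push_cast at h2; omega
    have hlenv : L.length < v.length := by
      have := hlt.trans_le hNv
      exact_mod_cast this
    rw [PySem.List.pyRange_one_cons hlt, List.foldl_cons, List.foldl_cons,
      List.replicate_succ, stepA_eq v L (List.replicate p 0),
      stepB_eq v L hv hlenv (List.replicate p 0)]
    have hcast : (((L ++ [newval v L]).length : Nat) : Int) = (L.length : Int) + 1 := by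
      simp
    have := ih (L ++ [newval v L]) (by simp) (by rw [hcast]; push_cast at h2 ⊢; omega)
    rw [hcast] at this
    simpa [List.append_assoc] using this

-- ===== VERDICT (by name: the statement is the Claim_ definition above) =====
theorem calc_py_spec : Claim_equal_calc_py := by
  intro v N hDom hPre
  unfold Spec_calc_py
  obtain ⟨hN1, hN2⟩ := hPre
  unfold calc_py calc_py_alt
  rcases eq_or_lt_of_le hN1 with h1 | h1
  · rw [← h1, PySem.List.pyRange_one_eq_nil (le_refl 1)]
    rfl
  · have hNv := hN2 h1
    have hv : ∀ e ∈ v, e ≤ 1000000000000000000 := by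
      intro e he
      unfold Dom_calc_py at hDom
      simp [List.all_eq_true, pvDomInt] at hDom
      have := (hDom.1 e he).2
      omega
    have hp : N.toNat = (N - 1).toNat + 1 := by omega
    have hinit : (List.replicate N.toNat (0 : Int)).set 0 1
        = [1] ++ List.replicate (N - 1).toNat 0 := by
      rw [hp]; simp [List.replicate_succ]
    rw [hinit]
    have := outer_eq v hv N hNv (N - 1).toNat [1] (by simp) (by simp; omega)
    simpa using this
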